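-- pv_equiv track=rewrite | github.com/natnordmoen/aoc2020 | day16.py | part2
-- ===== SOURCE A (Python) =====
-- from collections import defaultdict
--
-- def delete_used_field(column_to_rule, field):
--     for k, v in column_to_rule.items():
--         if field in v:
--             v.remove(field)
--     return column_to_rule
--
-- def filter_rules(column_to_rule):
--     final_mapping = {}  # colNumber : fieldName
--     while len(column_to_rule.keys()) != 0:
--         for k, v in column_to_rule.copy().items():
--             if len(v) == 1:
--                 final_mapping[k] = v[0]
--                 del column_to_rule[k]
--                 column_to_rule = delete_used_field(column_to_rule, v[0])
--     return final_mapping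
--
-- def part2(rules, tickets):
--     columns = len(tickets[0])
--     column_to_rule = defaultdict(lambda: [])
--     for c in range(columns):
--         for field, rule in rules.items():
--             for ticket in tickets:
--                 if ticket[c] not in rule:
--                     break
--             else:
--                 column_to_rule[c].append(field)
--     field_mapping = filter_rules(column_to_rule)
--     return {v: k for k, v in field_mapping.items()}  # fieldName : fieldNumber
-- ===== SOURCE B (Python) =====
-- def part2(rules, tickets):
--     # No candidate table: candidates are recomputed on demand from precomputed rule
--     # value-sets, and columns are resolved with a single cyclic scan pointer instead
--     # of repeated full passes over a mutated dict.
--     rule_sets = {f: set(r) for f, r in rules.items()}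
--     ncols = len(tickets[0])
--
--     def candidates(c, used):
--         col = [t[c] for t in tickets]
--         return [f for f, s in rule_sets.items() if f not in used and all(v in s for v in col)]
--
--     pending = [c for c in range(ncols) if candidates(c, set())]
--     result = {}   # fieldName : columnNumber, in assignment order
--     used = set()
--     i = idle = 0
--     while pending and idle < len(pending):
--         c = pending[i]
--         cands = candidates(c, used)
--         if len(cands) == 1:
--             f = cands[0]
--             result[f] = c
--             used.add(f)
--             pending.pop(i)
--             idle = 0
--             if i == len(pending):
--                 i = 0
--         else:
--             idle += 1
--             i += 1
--             if i == len(pending):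
--                 i = 0
--     return result
-- ===== Notes on version B (the rewrite author's own statement) =====
-- stated objective: alternative
-- what changed: B drops A's column-to-candidate-list table and its copy/delete pass machinery entirely: it precomputes only per-field rule value-sets, recomputes a column's candidate fields on demand from rules and tickets, and resolves columns with a single cyclic scan pointer plus an idle counter over a pending-column list (one assignment at a time) instead of A's repeated full passes over a mutated dict with a helper that eagerly removes used fields from every list. …
-- outside the precondition, e.g. on part2({}, [[0, -1, 9], [], [1], [2, 7]]): A returns {}, B raises IndexError; on part2({'a': [5]}, [[1], []]): A returns {}, B raises IndexError
import Mathlib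
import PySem

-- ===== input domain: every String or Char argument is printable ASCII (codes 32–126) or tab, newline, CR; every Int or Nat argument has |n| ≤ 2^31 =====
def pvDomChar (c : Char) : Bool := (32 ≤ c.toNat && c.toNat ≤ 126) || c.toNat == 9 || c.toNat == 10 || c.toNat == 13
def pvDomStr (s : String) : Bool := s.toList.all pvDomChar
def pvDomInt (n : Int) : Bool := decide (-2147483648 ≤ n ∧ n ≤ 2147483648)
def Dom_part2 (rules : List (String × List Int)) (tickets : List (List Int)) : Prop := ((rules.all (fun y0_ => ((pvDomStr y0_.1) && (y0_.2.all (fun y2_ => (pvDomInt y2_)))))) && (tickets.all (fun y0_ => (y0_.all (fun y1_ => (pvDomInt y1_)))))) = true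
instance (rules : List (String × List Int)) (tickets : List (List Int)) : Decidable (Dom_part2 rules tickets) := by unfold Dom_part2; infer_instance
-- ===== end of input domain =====

-- B drops A's candidate table and pass machinery: it recomputes a column's candidate fields on
-- demand from per-field rule value-sets and resolves columns with one cyclic scan pointer and an
-- idle counter (objective: alternative algorithm/data structure, same result).

-- ===== PORT A =====

-- delete_used_field: Python iterates the dict's items and mutates each value list in place;
-- ported as a fold over the keys that re-inserts the updated value (insert overwrites in place).
def dufStep (field : String) (d : PySem.Dict Int (List String)) (k : Int) :
    PySem.Dict Int (List String) :=
  let v := d.getD k []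
  if field ∈ v then d.insert k ((PySem.List.remove? v field).getD v) else d

def delete_used_field (d : PySem.Dict Int (List String)) (field : String) : PySem.Dict Int (List String) :=
  d.keys.foldl (dufStep field) d

-- the body of one iteration of the 'for k, v in column_to_rule.copy().items():' loop
-- (the shallow copy shares the value lists, so the live value is re-read: st.2.getD k [])
def stepA (st : PySem.Dict Int String × PySem.Dict Int (List String)) (k : Int) :
    PySem.Dict Int String × PySem.Dict Int (List String) :=
  let v := st.2.getD k []
  if v.length == 1 then
    (st.1.insert k (v.headD ""), delete_used_field (st.2.erase k) (v.headD ""))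
  else st

-- one iteration of the while loop: the for loop over the snapshot of the keys
def filterPass (st : PySem.Dict Int String × PySem.Dict Int (List String)) :
    PySem.Dict Int String × PySem.Dict Int (List String) :=
  st.2.keys.foldl stepA st

-- Python's 'while len(column_to_rule.keys()) != 0', with fuel: every pass either deletes at least
-- one key or leaves the state fixed (and then the Python loop never terminates — excluded by Pre_),
-- so size + 1 passes reach the fixpoint and the port returns final_mapping exactly where Python does.
def filter_rules_loop : Nat → PySem.Dict Int String × PySem.Dict Int (List String) → PySem.Dict Int String
  | 0, st => st.1
  | n+1, st => if st.2.size == 0 then st.1 else filter_rules_loop n (filterPass st)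

def filter_rules (ctr : PySem.Dict Int (List String)) : PySem.Dict Int String :=
  filter_rules_loop (ctr.size + 1) (PySem.Dict.empty, ctr)

def part2 (rules : List (String × List Int)) (tickets : List (List Int)) : List (String × Int) :=
  -- tickets[0]: IndexError on tickets = [] — excluded by Pre_, headD [] is exact elsewhere
  let columns : Int := ((tickets.headD []).length : Int)
  let ctr : PySem.Dict Int (List String) :=
    (PySem.List.pyRange 0 columns 1).foldl (fun ctr c =>
      rules.foldl (fun ctr fr =>
        -- 'for ticket in tickets: if ticket[c] not in rule: break / else: append(field)'
        -- ticket[c]: IndexError on a ticket shorter than tickets[0] — excluded by Pre_,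
        -- pyGetD is exact on in-range indices
        if tickets.all (fun t => decide (PySem.List.pyGetD t c 0 ∈ fr.2)) then
          ctr.insert c (ctr.getD c [] ++ [fr.1])
        else ctr) ctr) PySem.Dict.empty
  let field_mapping := filter_rules ctr
  -- {v: k for k, v in field_mapping.items()}
  (field_mapping.items.foldl (fun d kv => d.insert kv.2 kv.1)
    (PySem.Dict.empty : PySem.Dict String Int)).items

-- ===== PORT B =====

-- rule_sets = {f: set(r) for f, r in rules.items()}
def ruleSets (rules : List (String × List Int)) : PySem.Dict String (PySem.Set Int) :=
  rules.foldl (fun d fr => d.insert fr.1 (PySem.Set.ofList fr.2)) PySem.Dict.empty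

-- candidates(c, used): recomputed from rule_sets on each call
-- (t[c]: IndexError on a ticket shorter than tickets[0] — excluded by Pre_)
def candB (rs : PySem.Dict String (PySem.Set Int)) (tickets : List (List Int))
    (used : PySem.Set String) (c : Int) : List String :=
  let col := tickets.map (fun t => PySem.List.pyGetD t c 0)
  (rs.items.filter (fun p =>
    !(PySem.Set.contains used p.1) && col.all (fun v => PySem.Set.contains p.2 v))).map
    (fun p => p.1)

-- the while loop: cyclic index i over pending, idle counts consecutive non-assignments.
-- 'i < pending.length' in the guard is a totality guard only: it holds on every state the
-- Python loop reaches (Python's pending[i] / pending.pop(i) would raise beyond it).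
def part2_loop (rs : PySem.Dict String (PySem.Set Int)) (tickets : List (List Int))
    (pending : List Int) (used : PySem.Set String) (res : PySem.Dict String Int)
    (i idle : Nat) : PySem.Dict String Int :=
  if h : pending ≠ [] ∧ idle < pending.length ∧ i < pending.length then
    let c := pending.getD i 0
    let cands := candB rs tickets used c
    if cands.length == 1 then
      let f := cands.headD ""
      let pending' := pending.eraseIdx i
      part2_loop rs tickets pending' (PySem.Set.add used f) (res.insert f c)
        (if i = pending'.length then 0 else i) 0
    else
      part2_loop rs tickets pending used res
        (if i + 1 = pending.length then 0 else i + 1) (idle + 1)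
  else res
termination_by (pending.length, pending.length - idle)
decreasing_by
  · have : (pending.eraseIdx i).length < pending.length := by
      rw [List.length_eraseIdx_of_lt h.2.2]; omega
    exact Prod.Lex.left _ _ this
  · exact Prod.Lex.right _ (by omega)

def part2_alt (rules : List (String × List Int)) (tickets : List (List Int)) : List (String × Int) :=
  let rs := ruleSets rules
  -- tickets[0]: IndexError on tickets = [] — excluded by Pre_, headD [] is exact elsewhere
  let ncols : Int := ((tickets.headD []).length : Int)
  let pending := (PySem.List.pyRange 0 ncols 1).foldl
    (fun acc c => if candB rs tickets PySem.Set.empty c ≠ [] then acc ++ [c] else acc) []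
  (part2_loop rs tickets pending PySem.Set.empty PySem.Dict.empty 0 0).items

-- ===== PRECONDITION & SPEC =====

-- the candidate fields of column c (phase 1's table, restated for the precondition)
def preCand (rules : List (String × List Int)) (tickets : List (List Int)) (c : Nat) : List String :=
  (rules.filter (fun fr => tickets.all (fun t => decide (t.getD c 0 ∈ fr.2)))).map (fun fr => fr.1)

def preTable (rules : List (String × List Int)) (tickets : List (List Int)) :
    List (Int × List String) :=
  ((List.range (tickets.headD []).length).filter (fun c => preCand rules tickets c ≠ [])).map
    (fun c : Nat => ((c : Int), preCand rules tickets c))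

def removeField (table : List (Int × List String)) (c : Int) (f : String) :
    List (Int × List String) :=
  (table.filter (fun e => e.1 ≠ c)).map (fun e => (e.1, e.2.filter (fun g => g ≠ f)))

-- A's while loop terminates exactly when singleton elimination empties the candidate table; that
-- termination domain is a fixpoint property of the input with no simpler closed form. The check
-- below is order-independent (always the FIRST singleton) and is not a copy of either port's code;
-- each step removes one entry, so table.length steps of fuel decide it.
def resolvableFuel : Nat → List (Int × List String) → Bool
  | _, [] => true
  | 0, _ => false
  | n+1, e0 :: rest =>
    match (e0 :: rest).find? (fun e => e.2.length == 1) with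
    | none => false
    | some e => resolvableFuel n (removeField (e0 :: rest) e.1 (e.2.headD ""))

def resolvableTable (table : List (Int × List String)) : Bool :=
  resolvableFuel table.length table

-- Pre_ excludes the inputs where the Python A does not reliably return: tickets = [] and tickets with a
-- row shorter than the first (A's ticket[c] usually raises IndexError there; when rules is empty or the
-- membership test short-circuits before reaching the short row A still returns — an evaluation-order
-- accident B does not reproduce, since B always reads every row of a column first); and candidate tables
-- not emptied by singleton elimination, on which A's while loop never terminates. Duplicate field names
-- in `rules` are also excluded: the Python argument is a dict, whose keys are necessarily distinct, so
-- this excludes no Python input.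
def Pre_part2 (rules : List (String × List Int)) (tickets : List (List Int)) : Prop :=
  tickets ≠ [] ∧ (∀ t ∈ tickets, (tickets.headD []).length ≤ t.length) ∧
  (rules.map (fun fr => fr.1)).Nodup ∧ resolvableTable (preTable rules tickets) = true

instance (rules : List (String × List Int)) (tickets : List (List Int)) :
    Decidable (Pre_part2 rules tickets) := by unfold Pre_part2; infer_instance

def pvWitness_part2 : (List (String × List Int)) × List (List Int) :=
  ([("a", [1]), ("b", [1, 2])], [[1, 2]])

def Spec_part2 (rules : List (String × List Int)) (tickets : List (List Int))
    (out : List (String × Int)) : Prop := out = part2_alt rules tickets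

instance (rules : List (String × List Int)) (tickets : List (List Int)) (out : List (String × Int)) :
    Decidable (Spec_part2 rules tickets out) := by unfold Spec_part2; infer_instance

-- ===== CLAIM (what is proved, stated in full; the proofs are below) =====
def Claim_equal_part2 : Prop := ∀ (rules : List (String × List Int)) (tickets : List (List Int)), Dom_part2 rules tickets → Pre_part2 rules tickets → Spec_part2 rules tickets (part2 rules tickets)

-- ===== LEMMAS AND PROOFS =====


-- relation between A's live candidate list and a filtered list: Python's list.remove
def rmv (l : List String) (f : String) : List String :=
  if f ∈ l then (PySem.List.remove? l f).getD l else l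

theorem rmv_eq_filter (l : List String) (f : String) (h : l.Nodup) :
    rmv l f = l.filter (fun g => g != f) := by
  unfold rmv
  by_cases hm : f ∈ l
  · rw [if_pos hm]
    unfold PySem.List.remove?
    cases hidx : List.idxOf? f l with
    | none => rw [List.idxOf?_eq_none_iff] at hidx; exact absurd hm hidx
    | some i =>
      have he : l.erase f = l.eraseIdx i := by rw [List.erase_eq_eraseIdx, hidx]
      simp only [Option.map_some, Option.getD_some]
      rw [← he, List.Nodup.erase_eq_filter h]
  · rw [if_neg hm]
    symm
    apply List.filter_eq_self.mpr
    intro a ha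
    simp only [bne_iff_ne, ne_eq]
    exact fun hq => hm (hq ▸ ha)

-- items of a dict with Nodup keys determine entries uniquely
theorem mem_items_unique (d : PySem.Dict Int (List String)) (hnd : d.keys.Nodup)
    {k : Int} {v : List String} (hv : (k, v) ∈ d.items) (p : Int × List String)
    (hp : p ∈ d.items) (hpk : p.1 = k) : p = (k, v) := by
  have h1 := PySem.Dict.get?_of_mem_items d hv hnd
  have h2 := PySem.Dict.get?_of_mem_items d (show (p.1, p.2) ∈ d.items from hp) hnd
  rw [hpk, h1] at h2
  have : v = p.2 := by injection h2
  rw [← hpk] at hv ⊢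
  exact Prod.ext rfl this.symm

theorem dufStep_char (f : String) (d : PySem.Dict Int (List String)) (k : Int)
    (v0 : List String) (hv : (k, v0) ∈ d.items) (hnd : d.keys.Nodup) :
    (dufStep f d k).items = d.items.map (fun p => if p.1 = k then (p.1, rmv p.2 f) else p) := by
  have hget : d.getD k [] = v0 := PySem.Dict.getD_of_mem_items d hv hnd []
  have hcont : d.contains k = true := by
    rw [PySem.Dict.contains_iff_mem_keys]
    exact List.mem_map_of_mem hv
  unfold dufStep
  rw [hget]
  by_cases hf : f ∈ v0
  · rw [if_pos hf, PySem.Dict.items_insert_of_contains d _ hcont]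
    apply List.map_congr_left
    intro p hp
    by_cases hpk : p.1 = k
    · have hpe := mem_items_unique d hnd hv p hp hpk
      rw [if_pos (by simp [hpk]), if_pos hpk, hpe]
      simp only [rmv, if_pos hf]
    · rw [if_neg (by simp [hpk]), if_neg hpk]
  · rw [if_neg hf]
    symm
    conv_rhs => rw [← List.map_id d.items]
    apply List.map_congr_left
    intro p hp
    by_cases hpk : p.1 = k
    · have hpe := mem_items_unique d hnd hv p hp hpk
      rw [if_pos hpk, hpe]
      simp only [rmv, if_neg hf, id]
    · rw [if_neg hpk]; rfl

theorem keys_map_fst_invariant (d : PySem.Dict Int (List String))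
    (g : Int × List String → Int × List String) (hg : ∀ p, (g p).1 = p.1) :
    (PySem.Dict.mk (d.items.map g) : PySem.Dict Int (List String)).keys = d.keys := by
  simp only [PySem.Dict.keys, List.map_map]
  exact List.map_congr_left (fun p _ => hg p)

theorem duf_aux (f : String) : ∀ (kl : List Int) (d : PySem.Dict Int (List String)),
    kl.Nodup → d.keys.Nodup → (∀ k ∈ kl, k ∈ d.keys) →
    (kl.foldl (dufStep f) d).items
      = d.items.map (fun p => if p.1 ∈ kl then (p.1, rmv p.2 f) else p) := by
  intro kl
  induction kl with
  | nil =>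
    intro d _ _ _
    simp only [List.foldl_nil, List.not_mem_nil, if_false]
    exact (List.map_id d.items).symm
  | cons k kl ih =>
    intro d hkl hnd hmem
    have hk : k ∈ d.keys := hmem k List.mem_cons_self
    obtain ⟨p0, hp0, hp0k⟩ := List.mem_map.mp hk
    have hp0' : (k, p0.2) ∈ d.items := by rw [← hp0k]; exact hp0
    rw [List.foldl_cons]
    have hstep := dufStep_char f d k p0.2 hp0' hnd
    have hkeys : (dufStep f d k).keys = d.keys := by
      have : dufStep f d k = PySem.Dict.mk (d.items.map (fun p => if p.1 = k then (p.1, rmv p.2 f) else p)) := by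
        apply PySem.Dict.ext
        exact hstep
      rw [this]
      apply keys_map_fst_invariant
      intro p
      by_cases hpk : p.1 = k
      · simp [hpk]
      · simp [hpk]
    rw [ih (dufStep f d k) (List.nodup_cons.mp hkl).2 (by rw [hkeys]; exact hnd)
        (by rw [hkeys]; exact fun x hx => hmem x (List.mem_cons_of_mem k hx)), hstep, List.map_map]
    apply List.map_congr_left
    intro p hp
    have hknotin : k ∉ kl := (List.nodup_cons.mp hkl).1
    by_cases hpk : p.1 = k
    · simp only [Function.comp_apply, if_pos hpk]
      rw [if_neg (by simpa [hpk] using hknotin)]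
      rw [if_pos (by rw [hpk]; exact List.mem_cons_self)]
    · simp only [Function.comp_apply, if_neg hpk]
      by_cases hpkl : p.1 ∈ kl
      · rw [if_pos hpkl, if_pos (List.mem_cons_of_mem k hpkl)]
      · rw [if_neg hpkl, if_neg (by simp [hpk, hpkl])]

theorem duf_items (d : PySem.Dict Int (List String)) (f : String) (hnd : d.keys.Nodup) :
    (delete_used_field d f).items = d.items.map (fun p => (p.1, rmv p.2 f)) := by
  unfold delete_used_field
  rw [duf_aux f d.keys d hnd hnd (fun k hk => hk)]
  apply List.map_congr_left
  intro p hp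
  have hpk : p.1 ∈ d.keys := List.mem_map_of_mem hp
  rw [if_pos hpk]

theorem stepA_skip (fm : PySem.Dict Int String) (ctr : PySem.Dict Int (List String)) (c : Int)
    (lA : List String) (hmem : (c, lA) ∈ ctr.items) (hnd : ctr.keys.Nodup)
    (hlen : lA.length ≠ 1) : stepA (fm, ctr) c = (fm, ctr) := by
  unfold stepA
  have hget : ctr.getD c [] = lA := PySem.Dict.getD_of_mem_items ctr hmem hnd []
  simp only [hget]
  rw [if_neg (by simpa using hlen)]

theorem stepA_assign (fm : PySem.Dict Int String) (ctr : PySem.Dict Int (List String)) (c : Int)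
    (f : String) (hmem : (c, [f]) ∈ ctr.items) (hnd : ctr.keys.Nodup) :
    stepA (fm, ctr) c = (fm.insert c f, delete_used_field (ctr.erase c) f) := by
  unfold stepA
  have hget : ctr.getD c [] = [f] := PySem.Dict.getD_of_mem_items ctr hmem hnd []
  simp only [hget]
  rw [if_pos (by simp)]
  rfl

theorem erase_items_split (d : PySem.Dict Int (List String)) (pre suf : List (Int × List String))
    (c : Int) (lA : List String) (hitems : d.items = pre ++ (c, lA) :: suf)
    (hnd : d.keys.Nodup) : (d.erase c).items = pre ++ suf := by
  have hkeys : (pre.map (fun p => p.1) ++ c :: suf.map (fun p => p.1)).Nodup := by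
    have : d.keys = pre.map (fun p => p.1) ++ c :: suf.map (fun p => p.1) := by
      show d.items.map (fun p => p.1) = _
      rw [hitems]; simp
    rw [← this]; exact hnd
  have hcpre : ∀ p ∈ pre, p.1 ≠ c := by
    intro p hp hpc
    have := (List.nodup_append.mp hkeys).2.2
    exact this p.1 (List.mem_map_of_mem hp) c List.mem_cons_self hpc
  have hcsuf : ∀ p ∈ suf, p.1 ≠ c := by
    intro p hp hpc
    have h2 := (List.nodup_append.mp hkeys).2.1
    rw [List.nodup_cons] at h2
    exact h2.1 (by rw [← hpc]; exact List.mem_map_of_mem hp)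
  show d.items.filter (fun p => !p.1 == c) = pre ++ suf
  rw [hitems, List.filter_append, List.filter_cons]
  rw [if_neg (by simp)]
  rw [List.filter_eq_self.mpr (fun p hp => by simpa using hcpre p hp),
      List.filter_eq_self.mpr (fun p hp => by simpa using hcsuf p hp)]

theorem loop_stable (st : PySem.Dict Int String × PySem.Dict Int (List String))
    (h : filterPass st = st) : ∀ n, filter_rules_loop n st = st.1 := by
  intro n
  induction n with
  | zero => rfl
  | succ n ih =>
    show (if st.2.size == 0 then st.1 else filter_rules_loop n (filterPass st)) = st.1
    split
    · rfl
    · rw [h]; exact ih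

-- ===== pass monotonicity and fuel irrelevance for A's while loop =====

-- A's whole loop, with just enough fuel (the value filter_rules computes)
def Arun (st : PySem.Dict Int String × PySem.Dict Int (List String)) : PySem.Dict Int String :=
  filter_rules_loop (st.2.items.length + 1) st

theorem duf_keys (d : PySem.Dict Int (List String)) (f : String) (hnd : d.keys.Nodup) :
    (delete_used_field d f).keys = d.keys := by
  have : delete_used_field d f = PySem.Dict.mk (d.items.map (fun p => (p.1, rmv p.2 f))) := by
    apply PySem.Dict.ext
    exact duf_items d f hnd
  rw [this]
  exact keys_map_fst_invariant d _ (fun p => rfl)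

theorem passA (S : List Int) : ∀ (fm : PySem.Dict Int String) (ctr : PySem.Dict Int (List String)),
    S.Nodup → (∀ k ∈ S, k ∈ ctr.keys) → ctr.keys.Nodup →
    (S.foldl stepA (fm, ctr)).2.items.length ≤ ctr.items.length
    ∧ (S.foldl stepA (fm, ctr)).2.keys.Nodup
    ∧ ((S.foldl stepA (fm, ctr)).2.items.length = ctr.items.length
        → S.foldl stepA (fm, ctr) = (fm, ctr)) := by
  induction S with
  | nil =>
    intro fm ctr _ _ hnd
    exact ⟨le_refl _, hnd, fun _ => rfl⟩
  | cons k rest ih =>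
    intro fm ctr hS hsub hnd
    rw [List.foldl_cons]
    have hk : k ∈ ctr.keys := hsub k List.mem_cons_self
    obtain ⟨p0, hp0, hp0k⟩ := List.mem_map.mp hk
    have hmem : (k, p0.2) ∈ ctr.items := by rw [← hp0k]; exact hp0
    have hget : ctr.getD k [] = p0.2 := PySem.Dict.getD_of_mem_items ctr hmem hnd []
    by_cases hlen : (ctr.getD k []).length = 1
    · obtain ⟨f, hf⟩ := List.length_eq_one_iff.mp (show p0.2.length = 1 by rw [← hget]; exact hlen)
      have hmemf : (k, [f]) ∈ ctr.items := by rw [← hf]; exact hmem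
      rw [stepA_assign fm ctr k f hmemf hnd]
      obtain ⟨pre, suf, hsplit⟩ := List.append_of_mem hmemf
      have herase : (ctr.erase k).items = pre ++ suf := erase_items_split ctr pre suf k [f] hsplit hnd
      have hkeysSplit : ctr.keys = pre.map (fun p => p.1) ++ k :: suf.map (fun p => p.1) := by
        show ctr.items.map (fun p => p.1) = _
        rw [hsplit]; simp
      have heraseKeys : (ctr.erase k).keys = pre.map (fun p => p.1) ++ suf.map (fun p => p.1) := by
        show (ctr.erase k).items.map (fun p => p.1) = _
        rw [herase]; simp
      have heraseNd : (ctr.erase k).keys.Nodup := by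
        rw [heraseKeys]
        have hks := hkeysSplit ▸ hnd
        rw [List.nodup_append] at hks ⊢
        obtain ⟨h1, h2, h3⟩ := hks
        rw [List.nodup_cons] at h2
        exact ⟨h1, h2.2, fun x hx y hy => h3 x hx y (List.mem_cons_of_mem _ hy)⟩
      have hdufKeys : (delete_used_field (ctr.erase k) f).keys = (ctr.erase k).keys :=
        duf_keys _ f heraseNd
      have hdufLen : (delete_used_field (ctr.erase k) f).items.length + 1 = ctr.items.length := by
        rw [duf_items _ f heraseNd, List.length_map, herase, hsplit]
        simp
        omega
      have hrest : ∀ k' ∈ rest, k' ∈ (delete_used_field (ctr.erase k) f).keys := by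
        intro k' hk'
        rw [hdufKeys, heraseKeys]
        have hin : k' ∈ ctr.keys := hsub k' (List.mem_cons_of_mem k hk')
        have hne : k' ≠ k := by
          intro he
          exact (List.nodup_cons.mp hS).1 (he ▸ hk')
        rw [hkeysSplit] at hin
        rcases List.mem_append.mp hin with h | h
        · exact List.mem_append_left _ h
        · rcases List.mem_cons.mp h with h' | h'
          · exact absurd h' hne
          · exact List.mem_append_right _ h'
      obtain ⟨ihle, ihnd, _⟩ := ih (fm.insert k f) (delete_used_field (ctr.erase k) f)
        (List.nodup_cons.mp hS).2 hrest (by rw [hdufKeys]; exact heraseNd)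
      refine ⟨by omega, ihnd, fun he => absurd he (by omega)⟩
    · rw [stepA_skip fm ctr k p0.2 hmem hnd (by rw [← hget]; exact hlen)]
      exact ih fm ctr (List.nodup_cons.mp hS).2
        (fun k' hk' => hsub k' (List.mem_cons_of_mem k hk')) hnd

theorem loop_unfold (n : Nat) (st : PySem.Dict Int String × PySem.Dict Int (List String))
    (hne : st.2.items.length ≠ 0) :
    filter_rules_loop (n + 1) st = filter_rules_loop n (filterPass st) := by
  have hsz : (st.2.size == 0) = false := by
    have h : st.2.size = st.2.items.length := rfl
    simp [h, hne]
  show (if st.2.size == 0 then st.1 else filter_rules_loop n (filterPass st)) = _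
  rw [hsz]
  simp

theorem Arun_unfold (st : PySem.Dict Int String × PySem.Dict Int (List String))
    (hne : st.2.items.length ≠ 0) :
    Arun st = filter_rules_loop st.2.items.length (filterPass st) :=
  loop_unfold st.2.items.length st hne

theorem Arun_zero (st : PySem.Dict Int String × PySem.Dict Int (List String))
    (h0 : st.2.items.length = 0) : Arun st = st.1 := by
  unfold Arun
  have hsz : (st.2.size == 0) = true := by
    have h : st.2.size = st.2.items.length := rfl
    simp [h, h0]
  rw [h0]
  show (if st.2.size == 0 then st.1 else _) = st.1
  rw [hsz]
  simp

theorem fuel_irrel : ∀ (n : Nat) (st : PySem.Dict Int String × PySem.Dict Int (List String)),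
    st.2.keys.Nodup → st.2.items.length < n → filter_rules_loop n st = Arun st := by
  intro n
  induction n using Nat.strong_induction_on with
  | _ n ih =>
    intro st hnd hlt
    cases n with
    | zero => omega
    | succ m =>
      by_cases h0 : st.2.items.length = 0
      · have hsz : (st.2.size == 0) = true := by
          have h : st.2.size = st.2.items.length := rfl
          simp [h, h0]
        rw [Arun_zero st h0]
        show (if st.2.size == 0 then st.1 else _) = st.1
        rw [hsz]
        simp
      · obtain ⟨hle, hndp, heq⟩ := passA st.2.keys st.1 st.2 hnd (fun k hk => hk) hnd
        have hfp : filterPass st = st.2.keys.foldl stepA (st.1, st.2) := rfl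
        rw [loop_unfold m st h0, Arun_unfold st h0]
        by_cases hp : (filterPass st).2.items.length = st.2.items.length
        · have hid : filterPass st = st := by rw [hfp]; exact heq (by rw [← hfp]; exact hp)
          rw [hid, loop_stable st hid m, loop_stable st hid st.2.items.length]
        · have hlt1 : (filterPass st).2.items.length < st.2.items.length := by
            rw [hfp]
            exact lt_of_le_of_ne hle (by rw [← hfp]; exact hp)
          have hndp' : (filterPass st).2.keys.Nodup := by rw [hfp]; exact hndp
          rw [ih m (Nat.lt_succ_self m) (filterPass st) hndp' (by omega),
              ih st.2.items.length (by omega) (filterPass st) hndp' hlt1]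

theorem Arun_pass (st : PySem.Dict Int String × PySem.Dict Int (List String))
    (hnd : st.2.keys.Nodup) (hne : st.2.items.length ≠ 0) :
    Arun st = Arun (filterPass st) := by
  obtain ⟨hle, hndp, heq⟩ := passA st.2.keys st.1 st.2 hnd (fun k hk => hk) hnd
  have hfp : filterPass st = st.2.keys.foldl stepA (st.1, st.2) := rfl
  rw [Arun_unfold st hne]
  by_cases hp : (filterPass st).2.items.length = st.2.items.length
  · have hid : filterPass st = st := by rw [hfp]; exact heq (by rw [← hfp]; exact hp)
    rw [hid, loop_stable st hid st.2.items.length]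
    exact (loop_stable st hid _).symm
  · have hlt1 : (filterPass st).2.items.length < st.2.items.length := by
      rw [hfp]
      exact lt_of_le_of_ne hle (by rw [← hfp]; exact hp)
    have hndp' : (filterPass st).2.keys.Nodup := by rw [hfp]; exact hndp
    exact fuel_irrel st.2.items.length (filterPass st) hndp' hlt1

theorem pass_id_of_nosingle (S : List Int) :
    ∀ (fm : PySem.Dict Int String) (ctr : PySem.Dict Int (List String)),
    (∀ k ∈ S, (ctr.getD k []).length ≠ 1) → S.foldl stepA (fm, ctr) = (fm, ctr) := by
  intro fm ctr
  induction S with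
  | nil => intro _; rfl
  | cons k rest ih =>
    intro h
    rw [List.foldl_cons]
    have hk : stepA (fm, ctr) k = (fm, ctr) := by
      unfold stepA
      rw [if_neg (by simpa using h k List.mem_cons_self)]
    rw [hk]
    exact ih (fun k' hk' => h k' (List.mem_cons_of_mem k hk'))

-- ===== facts about B's rule_sets dict and candidates =====

theorem ruleSets_items (rules : List (String × List Int))
    (h : (rules.map (fun fr => fr.1)).Nodup) :
    (ruleSets rules).items = rules.map (fun fr => (fr.1, PySem.Set.ofList fr.2)) := by
  have := PySem.Dict.items_foldl_insert_fresh (d := (PySem.Dict.empty : PySem.Dict String (PySem.Set Int)))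
    (l := rules) (k := fun fr => fr.1) (v := fun fr => PySem.Set.ofList fr.2)
    (fun a _ => PySem.Dict.contains_empty a.1) h
  simpa [ruleSets] using this

theorem contains_ofList_eq_decide (xs : List Int) (x : Int) :
    PySem.Set.contains (PySem.Set.ofList xs) x = decide (x ∈ xs) := by
  simp [pysem]

theorem contains_add_eq (s : PySem.Set String) (f x : String) :
    PySem.Set.contains (PySem.Set.add s f) x = (PySem.Set.contains s x || x == f) := by
  simp [pysem, Bool.beq_eq_decide_eq]

theorem candB_nodup (rs : PySem.Dict String (PySem.Set Int)) (tickets : List (List Int))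
    (used : PySem.Set String) (c : Int) (hk : rs.keys.Nodup) :
    (candB rs tickets used c).Nodup := by
  have hk' : (rs.items.map (fun p => p.1)).Nodup := hk
  simp only [candB]
  have hs : ((rs.items.filter (fun p =>
      !(PySem.Set.contains used p.1) &&
      (tickets.map (fun t => PySem.List.pyGetD t c 0)).all
        (fun v => PySem.Set.contains p.2 v))).map
      (fun p => p.1)).Sublist (rs.items.map (fun p => p.1)) :=
    (rs.items.filter_sublist).map _
  exact hk'.sublist hs

theorem candB_add (rs : PySem.Dict String (PySem.Set Int)) (tickets : List (List Int))
    (used : PySem.Set String) (c : Int) (f : String) :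
    (candB rs tickets used c).filter (fun g => g != f)
      = candB rs tickets (PySem.Set.add used f) c := by
  simp only [candB]
  rw [List.filter_map, List.filter_filter]
  congr 1
  apply List.filter_congr
  intro p _
  rw [contains_add_eq]
  cases hcu : PySem.Set.contains used p.1 <;>
    cases hq : (tickets.map (fun t => PySem.List.pyGetD t c 0)).all
        (fun v => PySem.Set.contains p.2 v) <;>
    cases hbe : (p.1 == f) <;> simp_all [Function.comp, bne]

theorem rmv_candB (rs : PySem.Dict String (PySem.Set Int)) (tickets : List (List Int))
    (used : PySem.Set String) (c : Int) (f : String) (hk : rs.keys.Nodup) :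
    rmv (candB rs tickets used c) f = candB rs tickets (PySem.Set.add used f) c := by
  rw [rmv_eq_filter _ _ (candB_nodup rs tickets used c hk)]
  exact candB_add rs tickets used c f

theorem not_mem_used_of_mem_candB (rs : PySem.Dict String (PySem.Set Int))
    (tickets : List (List Int)) (used : PySem.Set String) (c : Int) (f : String)
    (hf : f ∈ candB rs tickets used c) : f ∉ used := by
  intro hu
  simp only [candB, List.mem_map, List.mem_filter] at hf
  obtain ⟨p, ⟨_, hcond⟩, hpf⟩ := hf
  rw [Bool.and_eq_true, Bool.not_eq_true'] at hcond
  have : PySem.Set.contains used p.1 = true := by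
    rw [PySem.Set.contains_iff, hpf]
    exact hu
  rw [this] at hcond
  simp at hcond

-- ===== phase 1 of A: the candidate table =====

def candsAt (rules : List (String × List Int)) (tickets : List (List Int)) (c : Int) : List String :=
  (rules.filter (fun fr => tickets.all (fun t => decide (PySem.List.pyGetD t c 0 ∈ fr.2)))).map
    (fun fr => fr.1)

theorem candB_empty (rules : List (String × List Int)) (tickets : List (List Int)) (c : Int)
    (h : (rules.map (fun fr => fr.1)).Nodup) :
    candB (ruleSets rules) tickets PySem.Set.empty c = candsAt rules tickets c := by
  simp only [candB]
  rw [ruleSets_items rules h]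
  simp only [candsAt, List.filter_map, List.map_map, Function.comp_def, List.all_map,
    contains_ofList_eq_decide]
  rfl

def innerBody (tickets : List (List Int)) (c : Int) (ctr : PySem.Dict Int (List String))
    (fr : String × List Int) : PySem.Dict Int (List String) :=
  if tickets.all (fun t => decide (PySem.List.pyGetD t c 0 ∈ fr.2)) then
    ctr.insert c (ctr.getD c [] ++ [fr.1])
  else ctr

theorem inner_mem (tickets : List (List Int)) (c : Int) :
    ∀ (rs : List (String × List Int)) (d : PySem.Dict Int (List String)) (v0 : List String),
    d.keys.Nodup → (c, v0) ∈ d.items →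
    (rs.foldl (innerBody tickets c) d).items
      = d.items.map (fun p => if p.1 = c then (c, p.2 ++ candsAt rs tickets c) else p) := by
  intro rs
  induction rs with
  | nil =>
    intro d v0 hnd hmem
    simp only [List.foldl_nil, candsAt, List.filter_nil, List.map_nil, List.append_nil]
    symm
    have h : ∀ p ∈ d.items, (if p.1 = c then ((c, p.2) : Int × List String) else p) = id p := by
      intro p hp
      by_cases hpk : p.1 = c
      · rw [if_pos hpk, ← hpk]
        rfl
      · rw [if_neg hpk]
        rfl
    rw [List.map_congr_left h, List.map_id]
  | cons fr rs ih =>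
    intro d v0 hnd hmem
    rw [List.foldl_cons]
    by_cases htest : tickets.all (fun t => decide (PySem.List.pyGetD t c 0 ∈ fr.2)) = true
    · have hget : d.getD c [] = v0 := PySem.Dict.getD_of_mem_items d hmem hnd []
      have hcont : d.contains c = true := by
        rw [PySem.Dict.contains_iff_mem_keys]
        exact List.mem_map_of_mem hmem
      have hstep : innerBody tickets c d fr = d.insert c (v0 ++ [fr.1]) := by
        unfold innerBody
        rw [if_pos htest, hget]
      rw [hstep]
      have hitems' : (d.insert c (v0 ++ [fr.1])).items
          = d.items.map (fun p => if (p.1 == c) = true then (c, v0 ++ [fr.1]) else p) :=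
        PySem.Dict.items_insert_of_contains d _ hcont
      have hkeys' : (d.insert c (v0 ++ [fr.1])).keys = d.keys := by
        have hd : d.insert c (v0 ++ [fr.1]) = PySem.Dict.mk (d.items.map
            (fun p => if (p.1 == c) = true then (c, v0 ++ [fr.1]) else p)) :=
          PySem.Dict.ext hitems'
        rw [hd]
        apply keys_map_fst_invariant
        intro p
        by_cases hpk : p.1 = c
        · simp [hpk]
        · simp [hpk]
      have hmem' : (c, v0 ++ [fr.1]) ∈ (d.insert c (v0 ++ [fr.1])).items := by
        rw [hitems']
        refine List.mem_map.mpr ⟨(c, v0), ?_, by simp⟩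
        exact hmem
      rw [ih (d.insert c (v0 ++ [fr.1])) (v0 ++ [fr.1]) (by rw [hkeys']; exact hnd) hmem']
      rw [hitems', List.map_map]
      have hcands : candsAt (fr :: rs) tickets c = fr.1 :: candsAt rs tickets c := by
        unfold candsAt
        rw [List.filter_cons, if_pos htest]
        rfl
      rw [hcands]
      apply List.map_congr_left
      intro p hp
      by_cases hpk : p.1 = c
      · have hpe : p = (c, v0) := mem_items_unique d hnd hmem p hp hpk
        simp [hpe]
      · simp [hpk]
    · have hstep : innerBody tickets c d fr = d := by
        unfold innerBody
        rw [if_neg htest]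
      have hcands : candsAt (fr :: rs) tickets c = candsAt rs tickets c := by
        unfold candsAt
        rw [List.filter_cons, if_neg htest]
      rw [hstep, hcands, ih d v0 hnd hmem]

theorem inner_fresh (tickets : List (List Int)) (c : Int) :
    ∀ (rs : List (String × List Int)) (d : PySem.Dict Int (List String)),
    d.keys.Nodup → d.contains c = false →
    (rs.foldl (innerBody tickets c) d).items
      = d.items ++ (if candsAt rs tickets c = [] then [] else [(c, candsAt rs tickets c)]) := by
  intro rs
  induction rs with
  | nil =>
    intro d hnd hfresh
    simp [candsAt]
  | cons fr rs ih =>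
    intro d hnd hfresh
    rw [List.foldl_cons]
    by_cases htest : tickets.all (fun t => decide (PySem.List.pyGetD t c 0 ∈ fr.2)) = true
    · have hget : d.getD c [] = [] := PySem.Dict.getD_of_not_contains d [] hfresh
      have hstep : innerBody tickets c d fr = d.insert c [fr.1] := by
        unfold innerBody
        rw [if_pos htest, hget]
        rfl
      rw [hstep]
      have hitems' : (d.insert c [fr.1]).items = d.items ++ [(c, [fr.1])] :=
        PySem.Dict.items_insert_of_not_contains d _ hfresh
      have hkeys' : (d.insert c [fr.1]).keys = d.keys ++ [c] := by
        show (d.insert c [fr.1]).items.map (fun p => p.1) = _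
        rw [hitems', List.map_append]
        rfl
      have hnotmem : c ∉ d.keys := by
        intro hmem
        rw [← PySem.Dict.contains_iff_mem_keys, hfresh] at hmem
        simp at hmem
      have hnd' : (d.insert c [fr.1]).keys.Nodup := by
        rw [hkeys', List.nodup_append]
        exact ⟨hnd, List.nodup_singleton c,
          fun x hx y hy => by rw [List.mem_singleton.mp hy]; exact fun hxy => hnotmem (hxy ▸ hx)⟩
      have hmem' : (c, [fr.1]) ∈ (d.insert c [fr.1]).items := by
        rw [hitems']
        exact List.mem_append_right _ List.mem_cons_self
      rw [inner_mem tickets c rs (d.insert c [fr.1]) [fr.1] hnd' hmem']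
      rw [hitems', List.map_append]
      have hcands : candsAt (fr :: rs) tickets c = fr.1 :: candsAt rs tickets c := by
        unfold candsAt
        rw [List.filter_cons, if_pos htest]
        rfl
      rw [hcands]
      have hdid : d.items.map (fun p => if p.1 = c then (c, p.2 ++ candsAt rs tickets c) else p)
          = d.items := by
        have h : ∀ p ∈ d.items,
            (if p.1 = c then ((c, p.2 ++ candsAt rs tickets c) : Int × List String) else p) = id p := by
          intro p hp
          have : p.1 ≠ c := by
            intro hpk
            exact hnotmem (hpk ▸ List.mem_map_of_mem hp)
          rw [if_neg this]
          rfl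
        rw [List.map_congr_left h, List.map_id]
      rw [hdid]
      simp
    · have hstep : innerBody tickets c d fr = d := by
        unfold innerBody
        rw [if_neg htest]
      have hcands : candsAt (fr :: rs) tickets c = candsAt rs tickets c := by
        unfold candsAt
        rw [List.filter_cons, if_neg htest]
      rw [hstep, hcands, ih d hnd hfresh]

def tableA (rules : List (String × List Int)) (tickets : List (List Int)) (n : Nat) :
    List (Int × List String) :=
  ((List.range n).filter (fun c : Nat => candsAt rules tickets (c : Int) ≠ [])).map
    (fun c : Nat => ((c : Int), candsAt rules tickets (c : Int)))

theorem tableA_keys (rules : List (String × List Int)) (tickets : List (List Int)) (n : Nat) :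
    (tableA rules tickets n).map (fun p => p.1)
      = ((List.range n).filter (fun c : Nat => candsAt rules tickets (c : Int) ≠ [])).map
          (fun c : Nat => (c : Int)) := by
  unfold tableA
  rw [List.map_map]
  rfl

theorem buildA_items (rules : List (String × List Int)) (tickets : List (List Int)) : ∀ n : Nat,
    (((List.range n).map (fun k : Nat => (k : Int))).foldl
        (fun ctr c => rules.foldl (innerBody tickets c) ctr) PySem.Dict.empty).items
      = tableA rules tickets n := by
  intro n
  induction n with
  | zero => rfl
  | succ n ih =>
    rw [List.range_succ, List.map_append, List.foldl_append, List.map_cons, List.map_nil,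
        List.foldl_cons, List.foldl_nil]
    set d := ((List.range n).map (fun k : Nat => (k : Int))).foldl
        (fun ctr c => rules.foldl (innerBody tickets c) ctr) PySem.Dict.empty with hd
    have hkeys : d.keys = ((List.range n).filter
        (fun c : Nat => candsAt rules tickets (c : Int) ≠ [])).map (fun c : Nat => (c : Int)) := by
      show d.items.map (fun p => p.1) = _
      rw [ih, tableA_keys]
    have hnd : d.keys.Nodup := by
      rw [hkeys]
      exact ((List.nodup_range).sublist List.filter_sublist).map Nat.cast_injective
    have hfresh : d.contains ((n : Nat) : Int) = false := by
      rw [Bool.eq_false_iff]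
      intro hcon
      rw [PySem.Dict.contains_iff_mem_keys, hkeys] at hcon
      obtain ⟨c, hc, hceq⟩ := List.mem_map.mp hcon
      have : c = n := Nat.cast_injective hceq
      subst this
      exact absurd (List.mem_range.mp (List.mem_filter.mp hc).1) (lt_irrefl c)
    rw [inner_fresh tickets ((n : Nat) : Int) rules d hnd hfresh, ih]
    unfold tableA
    rw [List.range_succ, List.filter_append, List.map_append, List.filter_cons, List.filter_nil]
    by_cases hq : candsAt rules tickets ((n : Nat) : Int) ≠ []
    · rw [if_neg hq, if_pos (by simpa using hq)]
      rfl
    · rw [if_pos (by simpa using hq), if_neg (by simpa using hq)]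
      rfl

-- ===== the cyclic scan of B simulates A's passes =====

-- cyclic rotation bookkeeping for the idle counter
theorem rot_step (l : List Int) (i idle : Nat) (hi : i < l.length) (hidle : idle < l.length) :
    (l.drop (i+1) ++ l.take (i+1)).drop (l.length - (idle+1))
      = (l.drop i ++ l.take i).drop (l.length - idle) ++ [l[i]] := by
  rw [List.take_succ_eq_append_getElem hi, List.drop_eq_getElem_cons hi]
  have h1 : l.length - (idle + 1) ≤ (l.drop (i+1) ++ l.take i).length := by
    simp only [List.length_append, List.length_drop, List.length_take]
    omega
  calc (l.drop (i+1) ++ (l.take i ++ [l[i]])).drop (l.length - (idle+1))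
      = ((l.drop (i+1) ++ l.take i) ++ [l[i]]).drop (l.length - (idle+1)) := by
        rw [List.append_assoc]
    _ = (l.drop (i+1) ++ l.take i).drop (l.length - (idle+1)) ++ [l[i]] :=
        List.drop_append_of_le_length h1
    _ = (l[i] :: (l.drop (i+1) ++ l.take i)).drop (l.length - idle) ++ [l[i]] := by
        have h2 : l.length - idle = (l.length - (idle+1)) + 1 := by omega
        rw [h2, List.drop_succ_cons]

theorem cyc_sim (rs : PySem.Dict String (PySem.Set Int)) (tickets : List (List Int)) :
    ∀ (pending : List Int) (used : PySem.Set String) (res : PySem.Dict String Int)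
      (i idle : Nat) (fm : PySem.Dict Int String) (ctr : PySem.Dict Int (List String)),
    rs.keys.Nodup →
    ctr.items = pending.map (fun c => (c, candB rs tickets used c)) →
    pending.Nodup →
    res.items = fm.items.map (fun p => (p.2, p.1)) →
    (∀ f, f ∈ used ↔ f ∈ fm.values) →
    fm.values.Nodup →
    (∀ k ∈ pending, fm.contains k = false) →
    (pending ≠ [] → i < pending.length) →
    idle ≤ pending.length →
    (∀ c ∈ (pending.drop i ++ pending.take i).drop (pending.length - idle),
        (candB rs tickets used c).length ≠ 1) →
    (part2_loop rs tickets pending used res i idle).items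
        = (Arun ((pending.drop i).foldl stepA (fm, ctr))).items.map (fun p => (p.2, p.1))
      ∧ (Arun ((pending.drop i).foldl stepA (fm, ctr))).values.Nodup := by
  intro pending used res i idle
  induction pending, used, res, i, idle using part2_loop.induct rs tickets with
  | case1 pending used res i idle hguard c cands hcond f pending' ih =>
    intro fm ctr hrs hctr hpnd hres hused hvnd hfresh hi7 hi8 hNS
    obtain ⟨hne, hidle, hi⟩ := hguard
    -- abbreviations from the loop body
    have hcget : pending.getD i 0 = pending[i] := List.getD_eq_getElem pending 0 hi
    have hc : c = pending.getD i 0 := rfl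
    have hcands : cands = candB rs tickets used c := rfl
    have hf : f = cands.headD "" := rfl
    have hpende : pending' = pending.eraseIdx i := rfl
    obtain ⟨f0, hf0⟩ := List.length_eq_one_iff.mp (show cands.length = 1 by simpa using hcond)
    have hcandsf : cands = [f] := by rw [hf, hf0]; rfl
    -- keys of ctr are exactly pending
    have hkeys : ctr.keys = pending := by
      show ctr.items.map (fun p => p.1) = pending
      rw [hctr, List.map_map]
      exact List.map_id pending
    have hndk : ctr.keys.Nodup := by rw [hkeys]; exact hpnd
    -- the assignment step of A
    have hcpend : c ∈ pending := by rw [hc, hcget]; exact List.getElem_mem hi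
    have hcmem : (c, [f]) ∈ ctr.items := by
      rw [hctr, ← hcandsf]
      refine List.mem_map.mpr ⟨c, hcpend, ?_⟩
      rw [hcands]
    have hstep : stepA (fm, ctr) c = (fm.insert c f, delete_used_field (ctr.erase c) f) :=
      stepA_assign fm ctr c f hcmem hndk
    have hdrop : pending.drop i = c :: pending.drop (i+1) := by
      rw [List.drop_eq_getElem_cons hi, hc, hcget]
    have hlen' : pending'.length = pending.length - 1 := by
      rw [hpende, List.length_eraseIdx_of_lt hi]
    have htake_len : (pending.take i).length = i := by rw [List.length_take]; omega
    have hdrop' : pending'.drop i = pending.drop (i+1) := by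
      have h1 : (pending.take i).drop i = [] :=
        List.drop_eq_nil_iff.mpr (by rw [htake_len])
      rw [hpende, List.eraseIdx_eq_take_drop_succ,
        List.drop_append_of_le_length (le_of_eq htake_len.symm), h1, List.nil_append]
    -- c does not survive into pending'
    have hcnot : c ∉ pending' := by
      rw [hpende, List.eraseIdx_eq_take_drop_succ]
      intro hmem
      have hdecomp : pending = pending.take i ++ c :: pending.drop (i+1) := by
        conv_lhs => rw [← List.take_append_drop i pending, hdrop]
      have hnd2 : (pending.take i ++ c :: pending.drop (i+1)).Nodup := hdecomp ▸ hpnd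
      rcases List.mem_append.mp hmem with hm | hm
      · exact (List.nodup_append.mp hnd2).2.2 c hm c List.mem_cons_self rfl
      · exact (List.nodup_cons.mp (List.nodup_append.mp hnd2).2.1).1 hm
    have hpnd' : pending'.Nodup := hpnd.sublist (List.eraseIdx_sublist pending i)
    -- the new A-state corresponds to pending' with f marked used
    have hsplit : ctr.items = (pending.take i).map (fun c' => (c', candB rs tickets used c'))
        ++ (c, [f]) :: (pending.drop (i+1)).map (fun c' => (c', candB rs tickets used c')) := by
      conv_lhs => rw [hctr, ← List.take_append_drop i pending, hdrop]
      rw [← hcandsf]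
      simp [hcands]
    have herase : (ctr.erase c).items
        = pending'.map (fun c' => (c', candB rs tickets used c')) := by
      rw [erase_items_split ctr _ _ c [f] hsplit hndk, hpende, List.eraseIdx_eq_take_drop_succ,
        List.map_append]
    have heraseKeys : (ctr.erase c).keys = pending' := by
      show (ctr.erase c).items.map (fun p => p.1) = pending'
      rw [herase, List.map_map]
      exact List.map_id pending'
    have heraseNd : (ctr.erase c).keys.Nodup := by rw [heraseKeys]; exact hpnd'
    have hctr' : (delete_used_field (ctr.erase c) f).items
        = pending'.map (fun c' => (c', candB rs tickets (PySem.Set.add used f) c')) := by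
      rw [duf_items _ f heraseNd, herase, List.map_map]
      apply List.map_congr_left
      intro c' _
      simp only [Function.comp_apply]
      rw [rmv_candB rs tickets used c' f hrs]
    -- freshness of f and c
    have hfmem : f ∈ cands := by rw [hcandsf]; exact List.mem_singleton_self f
    have hfused : f ∉ used := not_mem_used_of_mem_candB rs tickets used c f (hcands ▸ hfmem)
    have hfvals : f ∉ fm.values := fun hin => hfused ((hused f).mpr hin)
    have hfmc : fm.contains c = false := hfresh c hcpend
    have hfm' : (fm.insert c f).items = fm.items ++ [(c, f)] :=
      PySem.Dict.items_insert_of_not_contains fm f hfmc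
    have hfmvals : (fm.insert c f).values = fm.values ++ [f] := by
      show (fm.insert c f).items.map (fun p => p.2) = _
      rw [hfm', List.map_append]
      rfl
    have hresf : res.contains f = false := by
      rw [Bool.eq_false_iff]
      intro hcon
      rw [PySem.Dict.contains_iff_mem_keys] at hcon
      apply hfvals
      have hrk : res.keys = fm.values := by
        show res.items.map (fun p => p.1) = fm.items.map (fun p => p.2)
        rw [hres, List.map_map]
        rfl
      rw [hrk] at hcon
      exact hcon
    have hres' : (res.insert f c).items = (fm.insert c f).items.map (fun p => (p.2, p.1)) := by
      rw [PySem.Dict.items_insert_of_not_contains res c hresf, hfm', List.map_append, hres]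
      rfl
    -- invariants for the recursive call
    have hused' : ∀ g', g' ∈ PySem.Set.add used f ↔ g' ∈ (fm.insert c f).values := by
      intro g'
      rw [PySem.Set.mem_add, hfmvals, List.mem_append, List.mem_singleton, hused g']
    have hvnd' : (fm.insert c f).values.Nodup := by
      rw [hfmvals, List.nodup_append]
      exact ⟨hvnd, List.nodup_singleton f,
        fun x hx y hy => by rw [List.mem_singleton.mp hy]; exact fun h => hfvals (h ▸ hx)⟩
    have hfresh' : ∀ k ∈ pending', (fm.insert c f).contains k = false := by
      intro k hk
      have hkp : k ∈ pending := (List.eraseIdx_sublist pending i).subset hk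
      have hkc : k ≠ c := fun he => hcnot (he ▸ hk)
      rw [PySem.Dict.contains_insert]
      simp [hkc, hfresh k hkp]
    have hi7' : pending' ≠ [] → (if i = pending'.length then 0 else i) < pending'.length := by
      intro hne'
      have : 0 < pending'.length := List.length_pos_of_ne_nil hne'
      split
      · exact this
      · omega
    have hNS' : ∀ c'' ∈ (pending'.drop (if i = pending'.length then 0 else i)
          ++ pending'.take (if i = pending'.length then 0 else i)).drop (pending'.length - 0),
        (candB rs tickets (PySem.Set.add used f) c'').length ≠ 1 := by
      intro c'' hmem
      exfalso
      have hlen2 : (pending'.drop (if i = pending'.length then 0 else i)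
          ++ pending'.take (if i = pending'.length then 0 else i)).length = pending'.length := by
        simp only [List.length_append, List.length_drop, List.length_take]
        split <;> omega
      rw [List.drop_eq_nil_iff.mpr (by omega)] at hmem
      exact List.not_mem_nil hmem
    obtain ⟨hIH1, hIH2⟩ := ih (fm.insert c f) (delete_used_field (ctr.erase c) f) hrs hctr'
      hpnd' hres' hused' hvnd' hfresh' hi7' (Nat.zero_le _) hNS'
    -- the A-side expressions coincide
    have hfold : (pending.drop i).foldl stepA (fm, ctr)
        = (pending.drop (i+1)).foldl stepA (fm.insert c f, delete_used_field (ctr.erase c) f) := by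
      rw [hdrop, List.foldl_cons, hstep]
    have hE : Arun ((pending.drop i).foldl stepA (fm, ctr))
        = Arun ((pending'.drop (if i = pending'.length then 0 else i)).foldl stepA
            (fm.insert c f, delete_used_field (ctr.erase c) f)) := by
      rw [hfold]
      by_cases hwrap : i = pending'.length
      · rw [if_pos hwrap]
        have hnil : pending.drop (i+1) = [] := by
          apply List.drop_eq_nil_iff.mpr
          omega
        rw [hnil, List.drop_zero, List.foldl_nil]
        by_cases hpe : pending' = []
        · rw [hpe, List.foldl_nil]
        · have hkeys' : (delete_used_field (ctr.erase c) f).keys = pending' := by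
            show (delete_used_field (ctr.erase c) f).items.map (fun p => p.1) = pending'
            rw [hctr', List.map_map]
            exact List.map_id pending'
          have hlen0 : (delete_used_field (ctr.erase c) f).items.length ≠ 0 := by
            rw [hctr', List.length_map]
            intro h0
            exact hpe (List.eq_nil_of_length_eq_zero h0)
          rw [Arun_pass _ (by rw [hkeys']; exact hpnd') hlen0]
          congr 1
          show ((delete_used_field (ctr.erase c) f).keys).foldl stepA _ = _
          rw [hkeys']
      · rw [if_neg hwrap, hdrop']
    rw [hE]
    -- and the loop makes exactly this step
    have hloop : part2_loop rs tickets pending used res i idle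
        = part2_loop rs tickets pending' (PySem.Set.add used f) (res.insert f c)
            (if i = pending'.length then 0 else i) 0 := by
      rw [part2_loop]
      rw [dif_pos ⟨hne, hidle, hi⟩]
      simp only [← hc, ← hcands, if_pos hcond, ← hf, ← hpende]
    rw [hloop]
    exact ⟨hIH1, hIH2⟩
  | case2 pending used res i idle hguard c cands hcond ih =>
    intro fm ctr hrs hctr hpnd hres hused hvnd hfresh hi7 hi8 hNS
    obtain ⟨hne, hidle, hi⟩ := hguard
    have hcget : pending.getD i 0 = pending[i] := List.getD_eq_getElem pending 0 hi
    have hc : c = pending.getD i 0 := rfl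
    have hcands : cands = candB rs tickets used c := rfl
    have hlen1 : cands.length ≠ 1 := by simpa using hcond
    have hkeys : ctr.keys = pending := by
      show ctr.items.map (fun p => p.1) = pending
      rw [hctr, List.map_map]
      exact List.map_id pending
    have hndk : ctr.keys.Nodup := by rw [hkeys]; exact hpnd
    have hcpend : c ∈ pending := by rw [hc, hcget]; exact List.getElem_mem hi
    have hcmem : (c, cands) ∈ ctr.items := by
      rw [hctr]
      refine List.mem_map.mpr ⟨c, hcpend, ?_⟩
      rw [hcands]
    have hstep : stepA (fm, ctr) c = (fm, ctr) := stepA_skip fm ctr c cands hcmem hndk hlen1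
    have hdrop : pending.drop i = c :: pending.drop (i+1) := by
      rw [List.drop_eq_getElem_cons hi, hc, hcget]
    have hfold : (pending.drop i).foldl stepA (fm, ctr)
        = (pending.drop (i+1)).foldl stepA (fm, ctr) := by
      rw [hdrop, List.foldl_cons, hstep]
    have hi7' : pending ≠ [] → (if i + 1 = pending.length then 0 else i + 1) < pending.length := by
      intro hne'
      split
      · omega
      · omega
    have hNS' : ∀ c'' ∈ (pending.drop (if i + 1 = pending.length then 0 else i + 1)
          ++ pending.take (if i + 1 = pending.length then 0 else i + 1)).drop
            (pending.length - (idle + 1)),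
        (candB rs tickets used c'').length ≠ 1 := by
      have hrot := rot_step pending i idle hi hidle
      intro c'' hmem
      have hmem' : c'' ∈ (pending.drop i ++ pending.take i).drop (pending.length - idle)
          ++ [pending[i]] := by
        rw [← hrot]
        by_cases hwrap : i + 1 = pending.length
        · rw [if_pos hwrap] at hmem
          have heq2 : (pending.drop 0 ++ pending.take 0 : List Int)
              = pending.drop (i+1) ++ pending.take (i+1) := by
            rw [hwrap]
            simp
          rw [heq2] at hmem
          exact hmem
        · rw [if_neg hwrap] at hmem
          exact hmem
      rcases List.mem_append.mp hmem' with hm | hm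
      · exact hNS c'' hm
      · rw [List.mem_singleton.mp hm, ← hcget, ← hc, ← hcands]
        exact hlen1
    obtain ⟨hIH1, hIH2⟩ := ih fm ctr hrs hctr hpnd hres hused hvnd hfresh hi7'
      (by omega) hNS'
    have hE : Arun ((pending.drop i).foldl stepA (fm, ctr))
        = Arun ((pending.drop (if i + 1 = pending.length then 0 else i + 1)).foldl stepA
            (fm, ctr)) := by
      rw [hfold]
      by_cases hwrap : i + 1 = pending.length
      · rw [if_pos hwrap]
        have hnil : pending.drop (i+1) = [] := by rw [hwrap]; exact List.drop_length
        rw [hnil, List.drop_zero, List.foldl_nil]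
        have hlen0 : ctr.items.length ≠ 0 := by
          rw [hctr, List.length_map]
          intro h0
          exact hne (List.eq_nil_of_length_eq_zero h0)
        rw [Arun_pass (fm, ctr) hndk hlen0]
        congr 1
        show (ctr.keys).foldl stepA (fm, ctr) = _
        rw [hkeys]
      · rw [if_neg hwrap]
    rw [hE]
    have hloop : part2_loop rs tickets pending used res i idle
        = part2_loop rs tickets pending used res
            (if i + 1 = pending.length then 0 else i + 1) (idle + 1) := by
      rw [part2_loop]
      rw [dif_pos ⟨hne, hidle, hi⟩]
      simp only [← hc, ← hcands, if_neg (show ¬((cands.length == 1) = true) from hcond)]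
    rw [hloop]
    exact ⟨hIH1, hIH2⟩
  | case3 pending used res i idle hguard =>
    intro fm ctr hrs hctr hpnd hres hused hvnd hfresh hi7 hi8 hNS
    have hloop : part2_loop rs tickets pending used res i idle = res := by
      rw [part2_loop]
      rw [dif_neg hguard]
    rw [hloop]
    by_cases hpe : pending = []
    · have hnil : pending.drop i = [] := by rw [hpe]; simp
      rw [hnil, List.foldl_nil]
      have h0 : ctr.items.length = 0 := by rw [hctr, hpe]; rfl
      rw [Arun_zero (fm, ctr) h0]
      exact ⟨hres, hvnd⟩
    · have hi' : i < pending.length := hi7 hpe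
      have hidle : pending.length ≤ idle := by
        by_contra hidle
        exact hguard ⟨hpe, by omega, hi'⟩
      have hidle0 : idle = pending.length := by omega
      have hNSall : ∀ k ∈ pending, (candB rs tickets used k).length ≠ 1 := by
        intro k hk
        apply hNS k
        rw [hidle0, Nat.sub_self, List.drop_zero, List.mem_append]
        conv at hk => rw [← List.take_append_drop i pending]
        rcases List.mem_append.mp hk with hm | hm
        · right; exact hm
        · left; exact hm
      have hkeys : ctr.keys = pending := by
        show ctr.items.map (fun p => p.1) = pending
        rw [hctr, List.map_map]
        exact List.map_id pending
      have hndk : ctr.keys.Nodup := by rw [hkeys]; exact hpnd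
      have hgetD : ∀ k ∈ pending, ctr.getD k [] = candB rs tickets used k := by
        intro k hk
        have hkm : (k, candB rs tickets used k) ∈ ctr.items := by
          rw [hctr]
          exact List.mem_map.mpr ⟨k, hk, rfl⟩
        exact PySem.Dict.getD_of_mem_items ctr hkm hndk []
      have hfold : (pending.drop i).foldl stepA (fm, ctr) = (fm, ctr) := by
        apply pass_id_of_nosingle
        intro k hk
        have hkp : k ∈ pending := (List.drop_sublist i pending).subset hk
        rw [hgetD k hkp]
        exact hNSall k hkp
      have hpassid : filterPass (fm, ctr) = (fm, ctr) := by
        show (ctr.keys).foldl stepA (fm, ctr) = (fm, ctr)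
        rw [hkeys]
        apply pass_id_of_nosingle
        intro k hk
        rw [hgetD k hk]
        exact hNSall k hk
      rw [hfold]
      have hA : Arun (fm, ctr) = fm := loop_stable (fm, ctr) hpassid _
      rw [hA]
      exact ⟨hres, hvnd⟩

-- ===== VERDICT (by name: the statement is the Claim_ definition above) =====
theorem part2_spec : Claim_equal_part2 := by
  intro rules tickets _hdom hpre
  obtain ⟨-, -, hnod, -⟩ := hpre
  show part2 rules tickets = part2_alt rules tickets
  have hrange : PySem.List.pyRange 0 (((tickets.headD []).length : Nat) : Int) 1
      = (List.range (tickets.headD []).length).map (fun k : Nat => (k : Int)) :=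
    PySem.List.pyRange_zero_natCast (tickets.headD []).length
  have hA : part2 rules tickets
      = ((filter_rules (((List.range (tickets.headD []).length).map (fun k : Nat => (k : Int))).foldl
          (fun ctr c => rules.foldl (innerBody tickets c) ctr) PySem.Dict.empty)).items.foldl
          (fun d kv => d.insert kv.2 kv.1) (PySem.Dict.empty : PySem.Dict String Int)).items := by
    show ((filter_rules ((PySem.List.pyRange 0 (((tickets.headD []).length : Nat) : Int) 1).foldl
        (fun ctr c => rules.foldl (innerBody tickets c) ctr) PySem.Dict.empty)).items.foldl
        (fun d kv => d.insert kv.2 kv.1) (PySem.Dict.empty : PySem.Dict String Int)).items = _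
    rw [hrange]
  have hB : part2_alt rules tickets
      = (part2_loop (ruleSets rules) tickets
          (((List.range (tickets.headD []).length).map (fun k : Nat => (k : Int))).foldl
            (fun acc c => if candB (ruleSets rules) tickets PySem.Set.empty c ≠ [] then acc ++ [c]
              else acc) [])
          PySem.Set.empty PySem.Dict.empty 0 0).items := by
    show (part2_loop (ruleSets rules) tickets
          ((PySem.List.pyRange 0 (((tickets.headD []).length : Nat) : Int) 1).foldl
            (fun acc c => if candB (ruleSets rules) tickets PySem.Set.empty c ≠ [] then acc ++ [c]
              else acc) [])
          PySem.Set.empty PySem.Dict.empty 0 0).items = _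
    rw [hrange]
  set n := (tickets.headD []).length with hn
  set ctr0 : PySem.Dict Int (List String) :=
    ((List.range n).map (fun k : Nat => (k : Int))).foldl
      (fun ctr c => rules.foldl (innerBody tickets c) ctr) PySem.Dict.empty with hctr0def
  set pending0 : List Int :=
    (((List.range n).map (fun k : Nat => (k : Int))).foldl
      (fun acc c => if candB (ruleSets rules) tickets PySem.Set.empty c ≠ [] then acc ++ [c]
        else acc) []) with hpend0def
  have hpend0 : pending0 = ((List.range n).filter
      (fun c : Nat => candsAt rules tickets (c : Int) ≠ [])).map (fun c : Nat => (c : Int)) := by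
    rw [hpend0def, PySem.List.foldl_append_ite_eq_filter, List.nil_append, List.filter_map]
    congr 1
    apply List.filter_congr
    intro a _
    have hce := candB_empty rules tickets ((a : Nat) : Int) hnod
    simp only [Function.comp_apply, decide_eq_decide]
    rw [hce]
  have hctr0items : ctr0.items
      = pending0.map (fun c => (c, candB (ruleSets rules) tickets PySem.Set.empty c)) := by
    rw [buildA_items rules tickets n, hpend0, List.map_map]
    unfold tableA
    apply List.map_congr_left
    intro a _
    simp only [Function.comp_apply]
    rw [candB_empty rules tickets _ hnod]
  have hpnd0 : pending0.Nodup := by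
    rw [hpend0]
    exact ((List.nodup_range).sublist List.filter_sublist).map Nat.cast_injective
  have hrsnd : (ruleSets rules).keys.Nodup := by
    show ((ruleSets rules).items.map (fun p => p.1)).Nodup
    rw [ruleSets_items rules hnod, List.map_map]
    simpa [Function.comp_def] using hnod
  obtain ⟨hitems, hvals⟩ := cyc_sim (ruleSets rules) tickets pending0 PySem.Set.empty
    PySem.Dict.empty 0 0 PySem.Dict.empty ctr0 hrsnd hctr0items hpnd0 rfl
    (fun f => ⟨fun h => absurd h List.not_mem_nil, fun h => absurd h List.not_mem_nil⟩)
    List.nodup_nil (fun k _ => PySem.Dict.contains_empty k)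
    (fun hne => List.length_pos_of_ne_nil hne) (Nat.zero_le _)
    (by
      intro c'' hmem
      exfalso
      rw [List.drop_eq_nil_iff.mpr (by simp)] at hmem
      exact List.not_mem_nil hmem)
  rw [List.drop_zero] at hitems hvals
  have hkeys0 : ctr0.keys = pending0 := by
    show ctr0.items.map (fun p => p.1) = pending0
    rw [hctr0items, List.map_map]
    exact List.map_id pending0
  have hfr : filter_rules ctr0 = Arun (PySem.Dict.empty, ctr0) := rfl
  have hAB : Arun (PySem.Dict.empty, ctr0)
      = Arun (pending0.foldl stepA (PySem.Dict.empty, ctr0)) := by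
    by_cases hpe : pending0 = []
    · rw [hpe, List.foldl_nil]
    · have hlen0 : ctr0.items.length ≠ 0 := by
        rw [hctr0items, List.length_map]
        intro h0
        exact hpe (List.eq_nil_of_length_eq_zero h0)
      rw [Arun_pass (PySem.Dict.empty, ctr0)
        (by show ctr0.keys.Nodup; rw [hkeys0]; exact hpnd0) hlen0]
      congr 1
      show (ctr0.keys).foldl stepA _ = _
      rw [hkeys0]
  have hvnd2 : ((filter_rules ctr0).items.map (fun kv => kv.2)).Nodup := by
    show (filter_rules ctr0).values.Nodup
    rw [hfr, hAB]
    exact hvals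
  have hinv := PySem.Dict.items_foldl_insert_fresh (filter_rules ctr0).items
    (fun kv => kv.2) (fun kv => kv.1) (PySem.Dict.empty : PySem.Dict String Int)
    (fun a _ => PySem.Dict.contains_empty a.2) hvnd2
  rw [hA, hinv, hB, hitems, hfr, hAB]
  rfl
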